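-- pv_equiv track=rewrite | github.com/Rhaegal222/Unical | Primo Anno/Fondamenti di Programmazione 1/Esercizi/Old/NO domjudge/Siamo bocciati.py | confronto
-- ===== SOURCE A (Python) =====
-- def confronto(numeri_giocati, numeri_estratti):
--     cont = 1
--     lista2 = []
--     for i in range(len(numeri_giocati)):
--         for j in range(len(numeri_estratti)):
--             if numeri_giocati[i] == numeri_estratti[j]:
--                    lista2.append(j)
--     lista2.sort()
--     for i in range(len(lista2)-1):
--         if lista2[i]+1 == lista2[i+1]:
--             cont += 1
--     if cont == 1:
--         cont += 1
--     if cont >= 5: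
--         cont = 5
--     return cont
-- ===== SOURCE B (Python) =====
-- def confronto(numeri_giocati, numeri_estratti):
--     played = set(numeri_giocati)
--     matched = {j for j, v in enumerate(numeri_estratti) if v in played}
--     cont = 1 + sum(1 for j in matched if j + 1 in matched)
--     if cont == 1:
--         cont = 2
--     if cont >= 5:
--         cont = 5
--     return cont
-- ===== Notes on version B (the rewrite author's own statement) =====
-- stated objective: faster
-- what changed: Replaced the nested index loops, the sort and the sorted adjacent scan with two hash sets (played numbers, matched indices) and a count of matched indices j with j+1 also matched.
import Mathlib
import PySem

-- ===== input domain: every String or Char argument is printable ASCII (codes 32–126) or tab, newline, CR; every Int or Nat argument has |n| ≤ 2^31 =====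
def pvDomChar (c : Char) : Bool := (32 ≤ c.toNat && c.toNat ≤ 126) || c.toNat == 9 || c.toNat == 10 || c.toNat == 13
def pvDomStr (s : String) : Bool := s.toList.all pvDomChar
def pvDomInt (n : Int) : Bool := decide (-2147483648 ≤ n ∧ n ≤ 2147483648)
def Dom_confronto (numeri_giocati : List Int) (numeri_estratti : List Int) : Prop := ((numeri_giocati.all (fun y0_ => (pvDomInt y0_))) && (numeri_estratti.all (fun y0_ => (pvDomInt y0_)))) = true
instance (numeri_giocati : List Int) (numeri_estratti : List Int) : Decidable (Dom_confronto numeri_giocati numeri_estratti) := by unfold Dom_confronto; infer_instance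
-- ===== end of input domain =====

-- B drops A's nested index loops, sort and sorted adjacent scan: it builds the set of
-- matched extracted indices and counts j with j+1 also matched (objective: faster,
-- measurably so in a timing run).

-- ===== PORT A =====
def confronto (numeri_giocati : List Int) (numeri_estratti : List Int) : Int :=
  let lista2 : List Int :=
    (List.range numeri_giocati.length).foldl (fun acc i =>
      (List.range numeri_estratti.length).foldl (fun acc2 j =>
        if numeri_giocati.getD i 0 = numeri_estratti.getD j 0 then acc2 ++ [(j : Int)]
        else acc2) acc) []
  let lista2 := PySem.List.sorted lista2 (fun x => x) false
  let cont : Int :=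
    (List.range (lista2.length - 1)).foldl (fun cont i =>
      if lista2.getD i 0 + 1 = lista2.getD (i + 1) 0 then cont + 1 else cont) 1
  let cont := if cont = 1 then cont + 1 else cont
  let cont := if cont ≥ 5 then 5 else cont
  cont

-- ===== PORT B =====
def confronto_alt (numeri_giocati : List Int) (numeri_estratti : List Int) : Int :=
  let played : PySem.Set Int := PySem.Set.ofList numeri_giocati
  let matched : PySem.Set Int := PySem.Set.ofList
    ((PySem.List.enumerate numeri_estratti).filterMap
      (fun jv => if played.contains jv.2 then some jv.1 else none))
  let cont : Int := 1 + ((matched.filter (fun j => matched.contains (j + 1))).length : Int)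
  let cont := if cont = 1 then 2 else cont
  let cont := if cont ≥ 5 then 5 else cont
  cont

-- ===== PRECONDITION & SPEC =====
def Spec_confronto (numeri_giocati : List Int) (numeri_estratti : List Int) (out : Int) : Prop := out = confronto_alt numeri_giocati numeri_estratti
instance (numeri_giocati : List Int) (numeri_estratti : List Int) (out : Int) : Decidable (Spec_confronto numeri_giocati numeri_estratti out) := by unfold Spec_confronto; infer_instance

-- ===== CLAIM (what is proved, stated in full; the proofs are below) =====
def Claim_equal_confronto : Prop := ∀ (numeri_giocati : List Int) (numeri_estratti : List Int), Dom_confronto numeri_giocati numeri_estratti → Spec_confronto numeri_giocati numeri_estratti (confronto numeri_giocati numeri_estratti)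

-- ===== LEMMAS AND PROOFS =====

-- number of adjacent positions with successor step, structural form of A's second loop
def pvAdj : List Int → Nat
  | a :: b :: t => (if a + 1 = b then 1 else 0) + pvAdj (b :: t)
  | _ => 0

-- distinct elements of a (sorted) list, scanning adjacent duplicates
def pvSupp : List Int → List Int
  | a :: b :: t => if a = b then pvSupp (b :: t) else a :: pvSupp (b :: t)
  | l => l

theorem pvAdj_scan (s : List Int) (init : Int) :
    (List.range (s.length - 1)).foldl (fun cont i =>
      if s.getD i 0 + 1 = s.getD (i + 1) 0 then cont + 1 else cont) init
    = init + pvAdj s := by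
  induction s generalizing init with
  | nil => simp [pvAdj]
  | cons a t ih =>
    cases t with
    | nil => simp [pvAdj]
    | cons b t' =>
      have hlen : (a :: b :: t').length - 1 = ((b :: t').length - 1) + 1 := by
        simp
      rw [hlen, List.range_succ_eq_map, List.foldl_cons, List.foldl_map]
      simp only [List.getD_cons_succ, List.getD_cons_zero]
      have ih' := ih (init := if a + 1 = b then init + 1 else init)
      simp only [List.getD_cons_succ] at ih'
      rw [ih']
      simp only [pvAdj]
      split_ifs <;> push_cast <;> ring

theorem pvSupp_mem (s : List Int) (x : Int) : x ∈ pvSupp s ↔ x ∈ s := by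
  induction s with
  | nil => simp [pvSupp]
  | cons a t ih =>
    cases t with
    | nil => simp [pvSupp]
    | cons b t' =>
      by_cases hab : a = b
      · subst hab
        rw [show pvSupp (a :: a :: t') = pvSupp (a :: t') from by simp [pvSupp], ih]
        simp [List.mem_cons]
      · rw [show pvSupp (a :: b :: t') = a :: pvSupp (b :: t') from by simp [pvSupp, hab]]
        simp only [List.mem_cons]
        rw [show (x ∈ pvSupp (b :: t')) ↔ (x ∈ b :: t') from ih]
        simp [List.mem_cons]

theorem pvSupp_subset (s : List Int) : ∀ x ∈ pvSupp s, x ∈ s := fun x hx =>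
  (pvSupp_mem s x).mp hx

theorem pvSupp_nodup (s : List Int) (hs : s.Pairwise (· ≤ ·)) : (pvSupp s).Nodup := by
  induction s with
  | nil => simp [pvSupp]
  | cons a t ih =>
    cases t with
    | nil => simp [pvSupp]
    | cons b t' =>
      have hab : a ≤ b := (List.pairwise_cons.mp hs).1 b List.mem_cons_self
      have htail : (b :: t').Pairwise (· ≤ ·) := (List.pairwise_cons.mp hs).2
      by_cases heq : a = b
      · rw [show pvSupp (a :: b :: t') = pvSupp (b :: t') from by simp [pvSupp, heq]]
        exact ih htail
      · have halt : a < b := lt_of_le_of_ne hab heq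
        rw [show pvSupp (a :: b :: t') = a :: pvSupp (b :: t') from by simp [pvSupp, heq]]
        rw [List.nodup_cons]
        refine ⟨?_, ih htail⟩
        intro hmem
        have hx := pvSupp_subset _ _ hmem
        rcases List.mem_cons.mp hx with h | h
        · exact heq h
        · have hb : b ≤ a := (List.pairwise_cons.mp htail).1 a h
          omega

theorem pvAdj_eq_supp_count (s : List Int) (hs : s.Pairwise (· ≤ ·)) :
    pvAdj s = ((pvSupp s).filter (fun x => decide ((x + 1) ∈ s))).length := by
  induction s with
  | nil => simp [pvAdj, pvSupp]
  | cons a t ih =>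
    cases t with
    | nil =>
      simp [pvAdj, pvSupp]
    | cons b t' =>
      have hab : a ≤ b := (List.pairwise_cons.mp hs).1 b List.mem_cons_self
      have htail : (b :: t').Pairwise (· ≤ ·) := (List.pairwise_cons.mp hs).2
      have hbt : ∀ x ∈ t', b ≤ x := (List.pairwise_cons.mp htail).1
      have hshift : ∀ x ∈ pvSupp (b :: t'),
          (decide ((x + 1) ∈ a :: b :: t')) = (decide ((x + 1) ∈ b :: t')) := by
        intro x hx
        have hxm := pvSupp_subset _ _ hx
        have hbx : b ≤ x := by
          rcases List.mem_cons.mp hxm with h | h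
          · omega
          · exact hbt x h
        have hiff : ((x + 1) ∈ a :: b :: t') ↔ ((x + 1) ∈ b :: t') := by
          simp only [List.mem_cons]
          constructor
          · rintro (h | h)
            · exfalso
              rcases List.mem_cons.mp hxm with h2 | h2
              · omega
              · have := hbt x h2; omega
            · exact h
          · intro h; right; exact h
        simp [hiff]
      by_cases heq : a = b
      · subst heq
        have h1 : pvAdj (a :: a :: t') = pvAdj (a :: t') := by
          simp only [pvAdj]
          rw [if_neg (by omega)]
          simp
        have h2 : pvSupp (a :: a :: t') = pvSupp (a :: t') := by simp [pvSupp]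
        rw [h1, h2, List.filter_congr hshift]
        exact ih htail
      · have halt : a < b := lt_of_le_of_ne hab heq
        have hacond : ((a + 1) ∈ a :: b :: t') ↔ a + 1 = b := by
          simp only [List.mem_cons]
          constructor
          · rintro (h | h | h)
            · omega
            · exact h
            · have := hbt _ h; omega
          · intro h; right; left; exact h
        have h2 : pvSupp (a :: b :: t') = a :: pvSupp (b :: t') := by
          simp [pvSupp, heq]
        simp only [pvAdj]
        rw [h2, List.filter_cons, List.filter_congr hshift]
        by_cases hstep : a + 1 = b
        · simp only [if_pos hstep,
            if_pos (show decide ((a + 1) ∈ a :: b :: t') = true from by simp [hstep])]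
          simp [ih htail]
          omega
        · simp only [if_neg hstep,
            if_neg (show ¬ decide ((a + 1) ∈ a :: b :: t') = true from by
              simp only [decide_eq_true_eq]
              rw [hacond]
              exact hstep)]
          simp [ih htail]

-- Prop-conditioned append-if fold (the PySem lemma takes a Bool predicate)
theorem pvFoldlAppendIf {A B : Type} (p : A → Prop) [DecidablePred p] (f : A → B)
    (l : List A) : ∀ acc : List B,
    l.foldl (fun acc x => if p x then acc ++ [f x] else acc) acc
      = acc ++ (l.filter (fun x => decide (p x))).map f := by
  induction l with
  | nil => simp
  | cons a t ih =>
    intro acc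
    by_cases h : p a <;> simp [h, ih]

-- membership in A's (pre-sort) matched-index list
theorem memA (numeri_giocati numeri_estratti : List Int) (x : Int) :
    x ∈ (List.range numeri_giocati.length).foldl (fun acc i =>
      (List.range numeri_estratti.length).foldl (fun acc2 j =>
        if numeri_giocati.getD i 0 = numeri_estratti.getD j 0 then acc2 ++ [(j : Int)]
        else acc2) acc) ([] : List Int)
    ↔ ∃ j : Nat, j < numeri_estratti.length ∧ x = (j : Int) ∧
        numeri_estratti.getD j 0 ∈ numeri_giocati := by
  have hflat : (List.range numeri_giocati.length).foldl (fun acc i =>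
      (List.range numeri_estratti.length).foldl (fun acc2 j =>
        if numeri_giocati.getD i 0 = numeri_estratti.getD j 0 then acc2 ++ [(j : Int)]
        else acc2) acc) ([] : List Int)
      = (List.range numeri_giocati.length).flatMap (fun i =>
          ((List.range numeri_estratti.length).filter
            (fun j => decide (numeri_giocati.getD i 0 = numeri_estratti.getD j 0))).map
            (fun j : Nat => (j : Int))) := by
    rw [show (List.range numeri_giocati.length).foldl (fun acc i =>
        (List.range numeri_estratti.length).foldl (fun acc2 j =>
          if numeri_giocati.getD i 0 = numeri_estratti.getD j 0 then acc2 ++ [(j : Int)]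
          else acc2) acc) ([] : List Int)
      = (List.range numeri_giocati.length).foldl (fun acc i =>
          acc ++ ((List.range numeri_estratti.length).filter
            (fun j => decide (numeri_giocati.getD i 0 = numeri_estratti.getD j 0))).map
            (fun j : Nat => (j : Int))) ([] : List Int) from
        PySem.List.foldl_congr_mem _ _ _ _ (by
          intro acc i _
          exact pvFoldlAppendIf
            (fun j => numeri_giocati.getD i 0 = numeri_estratti.getD j 0)
            (fun j : Nat => (j : Int)) (List.range numeri_estratti.length) acc)]
    rw [PySem.List.foldl_append_eq_flatMap]
    simp
  rw [hflat]
  simp only [List.mem_flatMap, List.mem_map, List.mem_filter, List.mem_range,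
    decide_eq_true_eq]
  constructor
  · rintro ⟨i, hi, j, ⟨hj, hval⟩, hx⟩
    refine ⟨j, hj, hx.symm, ?_⟩
    rw [← hval]
    rw [List.getD_eq_getElem?_getD, List.getElem?_eq_getElem hi]
    exact List.getElem_mem hi
  · rintro ⟨j, hj, hx, hmem⟩
    obtain ⟨i, hi, hgi⟩ := List.mem_iff_getElem.mp hmem
    refine ⟨i, hi, j, ⟨hj, ?_⟩, hx.symm⟩
    rw [List.getD_eq_getElem?_getD, List.getElem?_eq_getElem hi]
    exact hgi

-- membership in B's matched set
theorem memB (numeri_giocati numeri_estratti : List Int) (x : Int) :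
    x ∈ PySem.Set.ofList
      ((PySem.List.enumerate numeri_estratti).filterMap
        (fun jv => if (PySem.Set.ofList numeri_giocati).contains jv.2 then some jv.1 else none))
    ↔ ∃ j : Nat, j < numeri_estratti.length ∧ x = (j : Int) ∧
        numeri_estratti.getD j 0 ∈ numeri_giocati := by
  rw [PySem.Set.mem_ofList, List.mem_filterMap]
  constructor
  · rintro ⟨⟨j, v⟩, hmem, hval⟩
    obtain ⟨k, hk, hp⟩ := (PySem.List.mem_enumerate_iff _ _ _).mp hmem
    simp only [Prod.mk.injEq] at hp
    obtain ⟨hj, hv⟩ := hp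
    by_cases hc : (PySem.Set.ofList numeri_giocati).contains v
    · rw [if_pos hc] at hval
      refine ⟨k, hk, ?_, ?_⟩
      · cases hval; omega
      · have : v ∈ numeri_giocati := by
          have := PySem.Set.contains_iff (s := PySem.Set.ofList numeri_giocati) (x := v)
          rw [PySem.Set.mem_ofList] at this
          exact this.mp hc
        rw [List.getD_eq_getElem?_getD, List.getElem?_eq_getElem hk]
        simpa [hv] using this
    · rw [if_neg hc] at hval; cases hval
  · rintro ⟨j, hj, hx, hmem⟩
    refine ⟨((j : Int), numeri_estratti[j]), ?_, ?_⟩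
    · exact (PySem.List.mem_enumerate_iff _ _ _).mpr ⟨j, hj, by simp⟩
    · have hmem' : numeri_estratti[j] ∈ numeri_giocati := by
        rw [List.getD_eq_getElem?_getD, List.getElem?_eq_getElem hj] at hmem
        simpa using hmem
      simp [hx, hmem']

-- the two counting loops agree
theorem count_eq (numeri_giocati numeri_estratti : List Int) :
    (List.range ((PySem.List.sorted ((List.range numeri_giocati.length).foldl (fun acc i =>
        (List.range numeri_estratti.length).foldl (fun acc2 j =>
          if numeri_giocati.getD i 0 = numeri_estratti.getD j 0 then acc2 ++ [(j : Int)]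
          else acc2) acc) ([] : List Int)) (fun x => x) false).length - 1)).foldl
      (fun cont i =>
        if (PySem.List.sorted ((List.range numeri_giocati.length).foldl (fun acc i =>
            (List.range numeri_estratti.length).foldl (fun acc2 j =>
              if numeri_giocati.getD i 0 = numeri_estratti.getD j 0 then acc2 ++ [(j : Int)]
              else acc2) acc) ([] : List Int)) (fun x => x) false).getD i 0 + 1
          = (PySem.List.sorted ((List.range numeri_giocati.length).foldl (fun acc i =>
            (List.range numeri_estratti.length).foldl (fun acc2 j =>
              if numeri_giocati.getD i 0 = numeri_estratti.getD j 0 then acc2 ++ [(j : Int)]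
              else acc2) acc) ([] : List Int)) (fun x => x) false).getD (i + 1) 0
        then cont + 1 else cont) (1 : Int)
    = 1 + (((PySem.Set.ofList
        ((PySem.List.enumerate numeri_estratti).filterMap
          (fun jv => if (PySem.Set.ofList numeri_giocati).contains jv.2 then some jv.1
            else none))).filter (fun j => (PySem.Set.ofList
        ((PySem.List.enumerate numeri_estratti).filterMap
          (fun jv => if (PySem.Set.ofList numeri_giocati).contains jv.2 then some jv.1
            else none))).contains (j + 1))).length : Int) := by
  rw [pvAdj_scan]
  congr 1
  set L : List Int := (List.range numeri_giocati.length).foldl (fun acc i =>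
      (List.range numeri_estratti.length).foldl (fun acc2 j =>
        if numeri_giocati.getD i 0 = numeri_estratti.getD j 0 then acc2 ++ [(j : Int)]
        else acc2) acc) ([] : List Int) with hL
  set s : List Int := PySem.List.sorted L (fun x => x) false with hsdef
  set M : List Int := (PySem.List.enumerate numeri_estratti).filterMap
      (fun jv => if (PySem.Set.ofList numeri_giocati).contains jv.2 then some jv.1
        else none) |> PySem.Set.ofList with hMdef
  have hpair : s.Pairwise (· ≤ ·) := PySem.List.sorted_pairwise L (fun x => x)
  have hmemS : ∀ y : Int, y ∈ s ↔ ∃ j : Nat, j < numeri_estratti.length ∧ y = (j : Int) ∧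
      numeri_estratti.getD j 0 ∈ numeri_giocati := by
    intro y
    rw [hsdef, PySem.List.mem_sorted, hL]
    exact memA numeri_giocati numeri_estratti y
  have hmemM : ∀ y : Int, y ∈ M ↔ ∃ j : Nat, j < numeri_estratti.length ∧ y = (j : Int) ∧
      numeri_estratti.getD j 0 ∈ numeri_giocati := by
    intro y
    rw [hMdef]
    exact memB numeri_giocati numeri_estratti y
  have hMs : ∀ y : Int, y ∈ M ↔ y ∈ s := by
    intro y; rw [hmemM, hmemS]
  have hndM : M.Nodup := PySem.Set.nodup_ofList _
  have hndS : (pvSupp s).Nodup := pvSupp_nodup s hpair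
  have hperm : M.Perm (pvSupp s) := by
    rw [List.perm_ext_iff_of_nodup hndM hndS]
    intro y
    rw [pvSupp_mem, hMs]
  have hfc : ∀ y ∈ M, (PySem.Set.contains M (y + 1)) = decide ((y + 1) ∈ s) := by
    intro y _
    rw [Bool.eq_iff_iff, decide_eq_true_eq, PySem.Set.contains_iff M (y + 1)]
    exact hMs (y + 1)
  rw [pvAdj_eq_supp_count s hpair]
  have := (hperm.filter (fun y => decide ((y + 1) ∈ s))).length_eq
  rw [← this, List.filter_congr hfc]

-- the identical post-processing agrees (A writes cont+1 where B writes 2, at cont = 1)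
theorem post_eq (c : Int) :
    (if (if c = 1 then c + 1 else c) ≥ 5 then (5 : Int) else if c = 1 then c + 1 else c)
    = (if (if c = 1 then 2 else c) ≥ 5 then (5 : Int) else if c = 1 then 2 else c) := by
  by_cases h : c = 1 <;> simp [h]

-- ===== VERDICT (by name: the statement is the Claim_ definition above) =====
theorem confronto_spec : Claim_equal_confronto := by
  intro numeri_giocati numeri_estratti _
  unfold Spec_confronto confronto confronto_alt
  dsimp only
  rw [count_eq]
  exact post_eq _
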